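-- pv_equiv track=rewrite | github.com/plumbusp/Algorithms-in-Python | dividend.py | find_profits
-- ===== SOURCE A (Python) =====
-- def find_profits(prices):
--     profits = [0]
--     total = 0
--     for i in range(1, len(prices)):
--         if prices[i] > prices[i-1]:
--             total+= (prices[i] - prices[i-1])+1
--         elif prices[i] == prices[i-1]:
--             total+= 1
--         profits.append(total)
--
--     return profits
-- ===== SOURCE B (Python) =====
-- def find_profits(prices):
--     # Different decomposition: compute the grand total first, then build the
--     # result BACK-TO-FRONT by peeling each step's delta off the total, and
--     # reverse at the end.
--     def step(a, b):
--         return b - a + 1 if b > a else (1 if b == a else 0)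
--     total = sum(step(a, b) for a, b in zip(prices, prices[1:]))
--     out = [total]
--     for i in range(len(prices) - 1, 0, -1):
--         total -= step(prices[i - 1], prices[i])
--         out.append(total)
--     return out[::-1]
-- ===== Notes on version B (the rewrite author's own statement) =====
-- stated objective: alternative
-- what changed: Instead of A's single forward loop accumulating a running total while appending, B first computes the grand total of all step deltas, then builds the output back-to-front by walking the indices in reverse and subtracting each delta from the total, reversing the list at the end.
import Mathlib
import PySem

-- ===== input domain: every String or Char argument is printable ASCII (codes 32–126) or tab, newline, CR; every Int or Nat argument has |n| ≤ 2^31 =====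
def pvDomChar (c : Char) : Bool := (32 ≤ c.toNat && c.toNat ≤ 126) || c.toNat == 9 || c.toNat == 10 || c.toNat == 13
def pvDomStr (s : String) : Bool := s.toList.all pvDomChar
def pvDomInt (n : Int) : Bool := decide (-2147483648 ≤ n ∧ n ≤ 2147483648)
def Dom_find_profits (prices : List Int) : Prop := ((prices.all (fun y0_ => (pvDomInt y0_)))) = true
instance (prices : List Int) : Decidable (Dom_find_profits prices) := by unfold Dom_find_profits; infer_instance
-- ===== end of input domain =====

-- B builds the result back-to-front: grand total of deltas first, then a reverse walk subtracting each delta, reversed at the end; alternative decomposition, not faster.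


-- ===== PORT A =====
-- literal port of A: one fold over range(1, len(prices)) carrying (total, profits);
-- pyGetD is exact here: every index the loop touches is in range.
def find_profits (prices : List Int) : List Int :=
  ((PySem.List.pyRange 1 (prices.length : Int) 1).foldl
    (fun (s : Int × List Int) i =>
      let pi := PySem.List.pyGetD prices i 0
      let pm := PySem.List.pyGetD prices (i - 1) 0
      let total := if pm < pi then s.1 + ((pi - pm) + 1)
                   else if pi = pm then s.1 + 1 else s.1
      (total, s.2 ++ [total])) ((0 : Int), [(0 : Int)])).2

-- ===== PORT B =====
-- Source B's helper 'step(a, b)'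
def fpStepB (a b : Int) : Int := if a < b then b - a + 1 else if b = a then 1 else 0

-- port of Source B: grand total over zip(prices, prices[1:]), then the backward loop
-- range(len-1, 0, -1) subtracting deltas and appending, then out[::-1].
-- pyGetD is exact here: every index the loop touches is in range.
def find_profits_alt (prices : List Int) : List Int :=
  let total := (prices.zip prices.tail).foldl (fun s ab => s + fpStepB ab.1 ab.2) 0
  let r := (PySem.List.pyRange ((prices.length : Int) - 1) 0 (-1)).foldl
    (fun (s : Int × List Int) i =>
      let t := s.1 - fpStepB (PySem.List.pyGetD prices (i - 1) 0) (PySem.List.pyGetD prices i 0)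
      (t, s.2 ++ [t])) (total, [total])
  r.2.reverse

-- ===== PRECONDITION & SPEC =====
def Spec_find_profits (prices : List Int) (out : List Int) : Prop := out = find_profits_alt prices
instance (prices : List Int) (out : List Int) : Decidable (Spec_find_profits prices out) := by unfold Spec_find_profits; infer_instance

-- ===== CLAIM (what is proved, stated in full; the proofs are below) =====
def Claim_equal_find_profits : Prop := ∀ (prices : List Int), Dom_find_profits prices → Spec_find_profits prices (find_profits prices)

-- ===== LEMMAS AND PROOFS =====

-- the delta of one adjacent pair
def fpDelta (ab : Int × Int) : Int := fpStepB ab.1 ab.2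

-- A's step, as a function of the adjacent pair it reads
def fpStep (s : Int × List Int) (ab : Int × Int) : Int × List Int :=
  (if ab.1 < ab.2 then s.1 + ((ab.2 - ab.1) + 1)
   else if ab.2 = ab.1 then s.1 + 1 else s.1,
   s.2 ++ [if ab.1 < ab.2 then s.1 + ((ab.2 - ab.1) + 1)
           else if ab.2 = ab.1 then s.1 + 1 else s.1])

-- B's backward step, as a function of the adjacent pair it reads
def fpGStep (s : Int × List Int) (ab : Int × Int) : Int × List Int :=
  (s.1 - fpDelta ab, s.2 ++ [s.1 - fpDelta ab])

-- A's index range, mapped to the pairs it reads, is exactly the zip of adjacent pairs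
lemma fp_pairs_eq (p : List Int) :
    (PySem.List.pyRange 1 (p.length : Int) 1).map
      (fun i => (PySem.List.pyGetD p (i - 1) 0, PySem.List.pyGetD p i 0))
      = p.zip p.tail := by
  apply List.ext_getElem
  · simp [PySem.List.length_pyRange_one, List.length_zip, List.length_tail]
  · intro k h1 h2
    have hk : k < p.length - 1 := by
      simpa [PySem.List.length_pyRange_one] using h1
    have hr : (PySem.List.pyRange 1 (p.length : Int) 1)[k]'(by simpa [PySem.List.length_pyRange_one]) = 1 + k :=
      PySem.List.getElem_pyRange_one ..
    have e2 : (1 : Int) + k = ((k + 1 : Nat) : Int) := by push_cast; omega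
    simp only [List.getElem_map, hr, e2, PySem.List.pyGetD_natCast]
    rw [List.getElem_zip]
    have htail : p.tail[k]'(by simp [List.length_tail]; omega) = p[k+1]'(by omega) := by
      simp [List.getElem_tail]
    simp [List.getD_eq_getElem?_getD, List.getElem?_eq_getElem (by omega : k < p.length),
      List.getElem?_eq_getElem (by omega : k + 1 < p.length), htail]

-- B's backward index range, mapped to the pairs it reads, is the same zip reversed
lemma fp_pairs_rev_eq (p : List Int) :
    (PySem.List.pyRange ((p.length : Int) - 1) 0 (-1)).map
      (fun i => (PySem.List.pyGetD p (i - 1) 0, PySem.List.pyGetD p i 0))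
      = (p.zip p.tail).reverse := by
  rw [PySem.List.pyRange_neg_one_eq_reverse, List.map_reverse]
  have : ((0 : Int) + 1) = 1 := by norm_num
  rw [this, show ((p.length : Int) - 1 + 1) = (p.length : Int) by ring, fp_pairs_eq]

-- A's fused fold, rebased at an arbitrary running total: the emitted suffix is the
-- t = 0 suffix with t added to every element
lemma fp_shift (zs : List (Int × Int)) : ∀ (t : Int) (acc : List Int),
    (zs.foldl fpStep (t, acc)).2
      = acc ++ ((zs.foldl fpStep (0, [])).2).map (fun x => x + t) := by
  induction zs with
  | nil => intro t acc; simp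
  | cons ab zs ih =>
    intro t acc
    have hstep : ∀ (u : Int), (if ab.1 < ab.2 then u + ((ab.2 - ab.1) + 1)
        else if ab.2 = ab.1 then u + 1 else u) = u + fpDelta ab := by
      intro u; unfold fpDelta fpStepB; split_ifs <;> omega
    simp only [List.foldl_cons, fpStep, hstep]
    rw [ih (t + fpDelta ab) (acc ++ [t + fpDelta ab])]
    simp only [zero_add, List.nil_append]
    rw [ih (fpDelta ab) [fpDelta ab]]
    simp only [List.map_append, List.map_map, List.map_cons, List.map_nil,
      List.append_assoc]
    have hf : ((fun x => x + t) ∘ fun x => x + fpDelta ab) = fun x => x + (t + fpDelta ab) := by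
      funext x; simp only [Function.comp]; ring
    simp [hf]
    ring

-- B's backward fold, rebased likewise (both components)
lemma fp_gshift (ws : List (Int × Int)) : ∀ (t : Int) (acc : List Int),
    ws.foldl fpGStep (t, acc)
      = (t + (ws.foldl fpGStep (0, [])).1,
         acc ++ ((ws.foldl fpGStep (0, [])).2).map (fun x => x + t)) := by
  induction ws with
  | nil => intro t acc; simp
  | cons ab ws ih =>
    intro t acc
    simp only [List.foldl_cons, fpGStep]
    rw [ih (t - fpDelta ab) (acc ++ [t - fpDelta ab])]
    simp only [zero_sub, List.nil_append]
    rw [ih (-fpDelta ab) [-fpDelta ab]]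
    simp only [Prod.mk.injEq]
    refine ⟨by ring, ?_⟩
    simp only [List.map_append, List.map_map, List.map_cons, List.map_nil,
      List.append_assoc]
    have hf : ((fun x => x + t) ∘ fun x => x + -fpDelta ab) = fun x => x + (t - fpDelta ab) := by
      funext x; simp only [Function.comp]; ring
    simp [hf]
    ring

-- the running total fold is the sum of the deltas
lemma fp_total (zs : List (Int × Int)) : ∀ (c : Int),
    zs.foldl (fun s ab => s + fpStepB ab.1 ab.2) c = c + (zs.map fpDelta).sum := by
  induction zs with
  | nil => intro c; simp
  | cons ab zs ih =>
    intro c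
    simp only [List.foldl_cons, List.map_cons, List.sum_cons, ih]
    show c + fpDelta ab + _ = _
    ring

-- the backward fold's first component subtracts all the deltas
lemma fp_gfst (ws : List (Int × Int)) : ∀ (t : Int) (acc : List Int),
    (ws.foldl fpGStep (t, acc)).1 = t - (ws.map fpDelta).sum := by
  induction ws with
  | nil => intro t acc; simp
  | cons ab ws ih =>
    intro t acc
    simp only [List.foldl_cons, fpGStep, ih, List.map_cons, List.sum_cons]
    ring

-- A as a fold over the zip of adjacent pairs
lemma fpA_eq (p : List Int) :
    find_profits p = ((p.zip p.tail).foldl fpStep (0, [0])).2 := by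
  unfold find_profits
  rw [← fp_pairs_eq p, List.foldl_map]
  rfl

-- B as a fold over the reversed zip of adjacent pairs
lemma fpB_eq (p : List Int) :
    find_profits_alt p
      = (((p.zip p.tail).reverse.foldl fpGStep
          (((p.zip p.tail).map fpDelta).sum, [((p.zip p.tail).map fpDelta).sum])).2).reverse := by
  unfold find_profits_alt
  rw [fp_total (p.zip p.tail) 0, ← fp_pairs_rev_eq p, List.foldl_map]
  simp only [zero_add]
  rfl

-- A satisfies the head recursion: profits(a::b::t) = 0 :: shifted profits(b::t)
lemma fp_rec (a b : Int) (t : List Int) :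
    find_profits (a :: b :: t)
      = 0 :: (find_profits (b :: t)).map (fun x => x + fpDelta (a, b)) := by
  rw [fpA_eq, fpA_eq]
  have hz : (a :: b :: t).zip (a :: b :: t).tail = (a, b) :: ((b :: t).zip t) := by
    simp [List.zip]
  rw [hz]
  have hstep0 : fpStep (0, [0]) (a, b) = (fpDelta (a, b), [0, fpDelta (a, b)]) := by
    unfold fpStep fpDelta fpStepB; split_ifs <;> simp
  have hzt : (b :: t).tail = t := rfl
  simp only [List.foldl_cons, hstep0, hzt]
  rw [show ([0, fpDelta (a, b)] : List Int) = [0] ++ [fpDelta (a, b)] from rfl,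
      fp_shift _ (fpDelta (a, b)) ([0] ++ [fpDelta (a, b)]),
      fp_shift ((b :: t).zip t) 0 [0]]
  simp

-- B satisfies the same head recursion
lemma fp_rec_alt (a b : Int) (t : List Int) :
    find_profits_alt (a :: b :: t)
      = 0 :: (find_profits_alt (b :: t)).map (fun x => x + fpDelta (a, b)) := by
  rw [fpB_eq, fpB_eq]
  have hz : (a :: b :: t).zip (a :: b :: t).tail = (a, b) :: ((b :: t).zip t) := by
    simp [List.zip]
  have hzt : (b :: t).tail = t := rfl
  rw [hz, hzt]
  set ws := ((b :: t).zip t).reverse with hws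
  set T : Int := (((b :: t).zip t).map fpDelta).sum with hT
  set d : Int := fpDelta (a, b) with hd
  have hsum : (ws.map fpDelta).sum = T := by
    rw [hws, List.map_reverse, List.sum_reverse]
  have hrev : ((a, b) :: (b :: t).zip t).reverse = ws ++ [(a, b)] := by simp [hws]
  have hmsum : (((a, b) :: (b :: t).zip t).map fpDelta).sum = d + T := by simp [hT, hd]
  rw [hrev, hmsum, List.foldl_append]
  rw [fp_gshift ws (d + T) [d + T], fp_gshift ws T [T]]
  have hfst : (List.foldl fpGStep (0, ([] : List Int)) ws).1 = -T := by
    rw [fp_gfst]; simp [hsum]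
  simp only [hfst, List.foldl_cons, List.foldl_nil, fpGStep]
  have e1 : d + T + -T - d = 0 := by ring
  rw [e1]
  simp only [List.cons_append, List.nil_append, List.reverse_append, List.reverse_cons,
    List.reverse_nil, List.nil_append, List.map_append, List.map_reverse, List.map_map,
    List.map_cons, List.map_nil]
  have hf : ((fun x => x + d) ∘ fun x => x + T) = fun x => x + (d + T) := by
    funext x; simp only [Function.comp]; ring
  simp [hf]
  ring

-- the equality itself, by the shared recursion scheme
lemma fp_all (p : List Int) : find_profits p = find_profits_alt p := by
  induction p with
  | nil => rfl
  | cons a tl ih =>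
    cases tl with
    | nil => rfl
    | cons b t =>
      rw [fp_rec a b t, fp_rec_alt a b t, ih]

-- ===== VERDICT (by name: the statement is the Claim_ definition above) =====
theorem find_profits_spec : Claim_equal_find_profits := by
  intro p _
  exact fp_all p
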